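-- pv_equiv track=rewrite | github.com/klahnakoski/mo-dots | tests/test_dot_speed.py | split_using_double_replace
-- ===== SOURCE A (Python) =====
-- def split_using_double_replace(field):
--     """
--     RETURN field AS ARRAY OF DOT-SEPARATED FIELDS
--     """
--     try:
--         if field.startswith(".."):
--             remainder = field.lstrip(".")
--             back = len(field) - len(remainder) - 1
--             return [".."] * back + [
--                 k.replace("\a\a", ".").replace("\b", ".") for k in remainder.replace("..", "\a\a").split(".") if k
--             ]
--         else:
--             return [k.replace("\a\a", ".").replace("\b", ".") for k in field.replace("..", "\a\a").split(".") if k]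
--     except Exception as cause:
--         return []
-- ===== SOURCE B (Python) =====
-- def _dot_run(field, i):
--     # index just past the run of '.' characters starting at i
--     j = i
--     n = len(field)
--     while j < n and field[j] == '.':
--         j += 1
--     return j
--
--
-- def split_using_double_replace(field):
--     """
--     RETURN field AS ARRAY OF DOT-SEPARATED FIELDS
--     (single-pass character scanner)
--     """
--     out = []
--     i = 0
--     n = len(field)
--     if field.startswith(".."):
--         i = _dot_run(field, 0)
--         out = [".."] * (i - 1)
--     buf = []  # characters of the current token
--     while i < n:
--         c = field[i]
--         if c == '.':
--             j = _dot_run(field, i)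
--             d = j - i
--             buf.extend('.' * (d // 2))
--             if d % 2 == 1:
--                 if buf:
--                     out.append(''.join(buf))
--                 buf = []
--             i = j
--         else:
--             buf.append('.' if c == '\b' else c)
--             i += 1
--     if buf:
--         out.append(''.join(buf))
--     return out
-- ===== Notes on version B (the rewrite author's own statement) =====
-- stated objective: alternative
-- what changed: A makes several whole-string passes (strip the leading dot run, encode dot pairs with a sentinel, split on single dots, decode each token); B is a single left-to-right character scan that consumes runs of dots in greedy pairs into the current token buffer and flushes the buffer on a leftover single dot.
import Mathlib
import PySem

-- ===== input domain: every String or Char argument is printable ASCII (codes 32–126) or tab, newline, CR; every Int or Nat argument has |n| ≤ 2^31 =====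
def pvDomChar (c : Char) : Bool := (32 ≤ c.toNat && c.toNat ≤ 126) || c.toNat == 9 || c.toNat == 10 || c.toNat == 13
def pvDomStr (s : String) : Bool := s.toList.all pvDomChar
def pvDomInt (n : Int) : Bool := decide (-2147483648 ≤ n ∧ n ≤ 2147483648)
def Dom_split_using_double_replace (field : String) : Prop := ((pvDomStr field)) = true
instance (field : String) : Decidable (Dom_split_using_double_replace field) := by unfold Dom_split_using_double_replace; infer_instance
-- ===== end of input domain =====

-- B replaces A's chained replace/split/replace passes by one single-pass character scanner (objective: alternative decomposition, same value on the whole domain).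

-- ===== PORT A =====
-- Port of A on code points (field.toList); lstrip(".") with a single-char strip set is
-- exactly List.dropWhile (· == '.'); the try/except never fires on a str argument.
def split_using_double_replace (field : String) : List String :=
  let cs := field.toList
  if PySem.Chars.startswith cs ['.', '.'] then
    let remainder := cs.dropWhile (· == '.')
    let back : Int := (cs.length : Int) - (remainder.length : Int) - 1
    PySem.List.pyRepeat [".."] back ++
      ((PySem.Chars.splitOn (PySem.Chars.replace remainder ['.', '.'] ['\x07', '\x07']) ['.']).filter
          (fun k => !k.isEmpty)).map
        (fun k => String.ofList (PySem.Chars.replace (PySem.Chars.replace k ['\x07', '\x07'] ['.']) ['\x08'] ['.']))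
  else
    ((PySem.Chars.splitOn (PySem.Chars.replace cs ['.', '.'] ['\x07', '\x07']) ['.']).filter
        (fun k => !k.isEmpty)).map
      (fun k => String.ofList (PySem.Chars.replace (PySem.Chars.replace k ['\x07', '\x07'] ['.']) ['\x08'] ['.']))

-- ===== PORT B =====
-- Source B's _dot_run(field, i): length of the run of '.' starting here.
def pvCountDots : List Char → Nat
  | c :: rest => if c = '.' then pvCountDots rest + 1 else 0
  | [] => 0

-- Source B's main while loop: current-token buffer `buf`, result accumulator `out`.
def pvScan : List Char → List Char → List String → List String
  | [], buf, out => if buf.isEmpty then out else out ++ [String.ofList buf]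
  | c :: rest, buf, out =>
    if c = '.' then
      let d := pvCountDots rest + 1
      let buf' := buf ++ List.replicate (d / 2) '.'
      if d % 2 = 1 then
        pvScan (rest.drop (d - 1)) [] (if buf'.isEmpty then out else out ++ [String.ofList buf'])
      else
        pvScan (rest.drop (d - 1)) buf' out
    else
      pvScan rest (buf ++ [if c = '\x08' then '.' else c]) out
termination_by cs _ _ => cs.length
decreasing_by
  all_goals simp only [List.length_cons, List.length_drop]
  all_goals omega

def split_using_double_replace_alt (field : String) : List String :=
  let cs := field.toList
  if PySem.Chars.startswith cs ['.', '.'] then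
    let lead := pvCountDots cs
    pvScan (cs.drop lead) [] (List.replicate (lead - 1) "..")
  else
    pvScan cs [] []

-- ===== PRECONDITION & SPEC =====
def Spec_split_using_double_replace (field : String) (out : List String) : Prop := out = split_using_double_replace_alt field
instance (field : String) (out : List String) : Decidable (Spec_split_using_double_replace field out) := by unfold Spec_split_using_double_replace; infer_instance

-- ===== CLAIM (what is proved, stated in full; the proofs are below) =====
def Claim_equal_split_using_double_replace : Prop := ∀ (field : String), Dom_split_using_double_replace field → Spec_split_using_double_replace field (split_using_double_replace field)

-- ===== LEMMAS AND PROOFS =====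

-- Greedy left-to-right replacement of the two-char pattern [u,u] by `new` (what
-- Python's s.replace(uu, new) computes), as a structural recursion.
def pvRp (u : Char) (new : List Char) : List Char → List Char
  | c1 :: c2 :: t => if c1 = u ∧ c2 = u then new ++ pvRp u new t else c1 :: pvRp u new (c2 :: t)
  | [c] => [c]
  | [] => []

-- s.split(".") as a structural recursion carrying the current piece `p` in order.
def pvSg : List Char → List Char → List (List Char)
  | [], p => [p]
  | c :: t, p => if c = '.' then p :: pvSg t [] else pvSg t (p ++ [c])

-- Encoding of B's buffer on the A side: each literal '.' in the buffer is a '\a\a' pair.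
def pvEnc : List Char → List Char := List.flatMap (fun c => if c = '.' then ['\x07', '\x07'] else [c])

-- A's per-token post-processing.
def pvPost (k : List Char) : String :=
  String.ofList (PySem.Chars.replace (PySem.Chars.replace k ['\x07', '\x07'] ['.']) ['\x08'] ['.'])

def pvNoBell (cs : List Char) : Prop := ∀ c ∈ cs, c ≠ '\x07' ∧ c ≠ '\x08'

-- unfolding equations of PySem.Chars.replace.go / splitOn.go (fuel-indexed internals)
theorem pvReplaceGo_zero (old new l acc : List Char) :
    PySem.Chars.replace.go old new 0 l acc = acc.reverse ++ l := by
  simp [PySem.Chars.replace.go]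

theorem pvReplaceGo_nil (old new acc : List Char) (n : Nat) :
    PySem.Chars.replace.go old new (n + 1) [] acc = acc.reverse := by
  simp [PySem.Chars.replace.go]

theorem pvReplaceGo_succ (old new : List Char) (c : Char) (t acc : List Char) (n : Nat) :
    PySem.Chars.replace.go old new (n + 1) (c :: t) acc =
      (if old.isPrefixOf (c :: t) then
        PySem.Chars.replace.go old new n (List.drop old.length (c :: t)) (new.reverse ++ acc)
       else PySem.Chars.replace.go old new n t (c :: acc)) := by
  simp [PySem.Chars.replace.go]

theorem pvSplitGo_zero (sep l cur : List Char) (acc : List (List Char)) :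
    PySem.Chars.splitOn.go sep 0 l cur acc = ((cur.reverse ++ l) :: acc).reverse := by
  simp [PySem.Chars.splitOn.go]

theorem pvSplitGo_nil (sep cur : List Char) (acc : List (List Char)) (n : Nat) :
    PySem.Chars.splitOn.go sep (n + 1) [] cur acc = (cur.reverse :: acc).reverse := by
  simp [PySem.Chars.splitOn.go]

theorem pvSplitGo_succ (sep : List Char) (c : Char) (t cur : List Char) (acc : List (List Char)) (n : Nat) :
    PySem.Chars.splitOn.go sep (n + 1) (c :: t) cur acc =
      (if sep.isPrefixOf (c :: t) then
        PySem.Chars.splitOn.go sep n (List.drop sep.length (c :: t)) [] (cur.reverse :: acc)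
       else PySem.Chars.splitOn.go sep n t (c :: cur) acc) := by
  simp [PySem.Chars.splitOn.go]

theorem pvRp_cons_of_ne (u : Char) (new : List Char) (c : Char) (t : List Char) (h : c ≠ u) :
    pvRp u new (c :: t) = c :: pvRp u new t := by
  cases t with
  | nil => simp [pvRp]
  | cons c2 t => simp [pvRp, h]

theorem pvReplace_go_pair (u : Char) (new : List Char) :
    ∀ fuel l acc, l.length ≤ fuel →
      PySem.Chars.replace.go [u, u] new fuel l acc = acc.reverse ++ pvRp u new l := by
  intro fuel
  induction fuel with
  | zero =>
    intro l acc h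
    have : l = [] := by cases l <;> simp_all
    subst this; simp [pvReplaceGo_zero, pvRp]
  | succ n ih =>
    intro l acc h
    match l with
    | [] => simp [pvReplaceGo_nil, pvRp]
    | [c] =>
      have hpre : ([u, u] : List Char).isPrefixOf [c] = false := by
        simp [List.isPrefixOf]
      rw [pvReplaceGo_succ, hpre]
      simp only [Bool.false_eq_true, if_false]
      rw [ih [] (c :: acc) (by simp)]
      simp [pvRp]
    | c1 :: c2 :: t =>
      by_cases hp : c1 = u ∧ c2 = u
      · have hpre : ([u, u] : List Char).isPrefixOf (c1 :: c2 :: t) = true := by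
          simp [List.isPrefixOf, hp.1, hp.2]
        rw [pvReplaceGo_succ, hpre]
        simp only [if_true, List.length_cons, List.drop_succ_cons, List.drop_zero, List.length_nil]
        rw [ih t (new.reverse ++ acc) (by simp at h ⊢; omega)]
        simp [pvRp, hp]
      · have hpre : ([u, u] : List Char).isPrefixOf (c1 :: c2 :: t) = false := by
          simp [List.isPrefixOf]; tauto
        rw [pvReplaceGo_succ, hpre]
        simp only [Bool.false_eq_true, if_false]
        rw [ih (c2 :: t) (c1 :: acc) (by simp at h ⊢; omega)]
        simp [pvRp, hp]

theorem pvReplace_pair (u : Char) (new l : List Char) :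
    PySem.Chars.replace l [u, u] new = pvRp u new l := by
  simp [PySem.Chars.replace]
  rw [pvReplace_go_pair u new l.length l [] (le_refl _)]
  simp

theorem pvReplace_single_go_id (u : Char) (new : List Char) :
    ∀ fuel l acc, l.length ≤ fuel → u ∉ l →
      PySem.Chars.replace.go [u] new fuel l acc = acc.reverse ++ l := by
  intro fuel
  induction fuel with
  | zero => intro l acc h hm; simp [pvReplaceGo_zero]
  | succ n ih =>
    intro l acc h hm
    match l with
    | [] => simp [pvReplaceGo_nil]
    | c :: t =>
      have hcu : ¬ u = c := fun he => hm (by simp [he])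
      have hpre : ([u] : List Char).isPrefixOf (c :: t) = false := by
        simp [List.isPrefixOf, hcu]
      rw [pvReplaceGo_succ, hpre]
      simp only [Bool.false_eq_true, if_false]
      rw [ih t (c :: acc) (by simp at h ⊢; omega) (fun hmem => hm (by simp [hmem]))]
      simp

theorem pvReplace_single_id (u : Char) (new l : List Char) (h : u ∉ l) :
    PySem.Chars.replace l [u] new = l := by
  simp [PySem.Chars.replace]
  rw [pvReplace_single_go_id u new l.length l [] (le_refl _) h]
  simp

theorem pvSplitOn_go_dot :
    ∀ fuel l cur acc, l.length ≤ fuel →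
      PySem.Chars.splitOn.go ['.'] fuel l cur acc = acc.reverse ++ pvSg l cur.reverse := by
  intro fuel
  induction fuel with
  | zero =>
    intro l cur acc h
    have : l = [] := by cases l <;> simp_all
    subst this; simp [pvSplitGo_zero, pvSg]
  | succ n ih =>
    intro l cur acc h
    match l with
    | [] => simp [pvSplitGo_nil, pvSg]
    | c :: t =>
      by_cases hc : c = '.'
      · have hpre : (['.'] : List Char).isPrefixOf (c :: t) = true := by
          simp [List.isPrefixOf, hc]
        rw [pvSplitGo_succ, hpre]
        simp only [if_true, List.length_cons, List.length_nil, List.drop_succ_cons, List.drop_zero]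
        rw [ih t [] (cur.reverse :: acc) (by simp at h ⊢; omega)]
        simp [pvSg, hc]
      · have hpre : (['.'] : List Char).isPrefixOf (c :: t) = false := by
          simp [List.isPrefixOf]; exact fun he => hc he.symm
        rw [pvSplitGo_succ, hpre]
        simp only [Bool.false_eq_true, if_false]
        rw [ih t (c :: cur) acc (by simp at h ⊢; omega)]
        simp [pvSg, hc]

theorem pvSplitOn_dot (l : List Char) : PySem.Chars.splitOn l ['.'] = pvSg l [] := by
  simp [PySem.Chars.splitOn]
  rw [pvSplitOn_go_dot (l.length + 1) l [] [] (by omega)]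
  simp

theorem pvEnc_append (a b : List Char) : pvEnc (a ++ b) = pvEnc a ++ pvEnc b := by
  simp [pvEnc]

theorem pvEnc_nil_iff (b : List Char) : pvEnc b = [] ↔ b = [] := by
  cases b with
  | nil => simp [pvEnc]
  | cons c t =>
    constructor
    · intro h; exfalso; simp [pvEnc] at h; rcases h with ⟨h1, _⟩
      by_cases hc : c = '.' <;> simp [hc] at h1
    · intro h; simp at h

theorem pvEnc_cons (c : Char) (t : List Char) :
    pvEnc (c :: t) = (if c = '.' then ['\x07', '\x07'] else [c]) ++ pvEnc t := by
  simp [pvEnc]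

theorem pvEnc_replicate_dot (k : Nat) :
    pvEnc (List.replicate k '.') = List.replicate (2 * k) '\x07' := by
  induction k with
  | zero => simp [pvEnc]
  | succ m ih =>
    have h2 : 2 * (m + 1) = (2 * m) + 1 + 1 := by omega
    rw [List.replicate_succ, h2, List.replicate_succ, List.replicate_succ, pvEnc_cons, ih]
    simp

theorem pvRp_enc (buf : List Char) (h : '\x07' ∉ buf) :
    pvRp '\x07' ['.'] (pvEnc buf) = buf := by
  induction buf with
  | nil => simp [pvEnc, pvRp]
  | cons c t ih =>
    have hc7 : c ≠ '\x07' := fun he => h (by simp [he])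
    have ht : '\x07' ∉ t := fun hm => h (by simp [hm])
    rw [pvEnc_cons]
    by_cases hc : c = '.'
    · subst hc
      rw [if_pos rfl]
      show pvRp '\x07' ['.'] ('\x07' :: '\x07' :: pvEnc t) = '.' :: t
      cases he : pvEnc t with
      | nil => simp [pvRp, (pvEnc_nil_iff t).mp he]
      | cons x xs =>
        rw [← he]
        have : pvRp '\x07' ['.'] ('\x07' :: '\x07' :: pvEnc t) = ['.'] ++ pvRp '\x07' ['.'] (pvEnc t) := by
          cases hx : pvEnc t with
          | nil => simp [pvRp]
          | cons y ys => simp [pvRp]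
        rw [this, ih ht]
        simp
    · rw [if_neg hc]
      show pvRp '\x07' ['.'] (c :: pvEnc t) = c :: t
      rw [pvRp_cons_of_ne _ _ _ _ hc7, ih ht]

theorem pvPost_enc (buf : List Char) (h7 : '\x07' ∉ buf) (h8 : '\x08' ∉ buf) :
    pvPost (pvEnc buf) = String.ofList buf := by
  unfold pvPost
  rw [pvReplace_pair, pvRp_enc buf h7, pvReplace_single_id _ _ _ h8]

theorem pvSg_append_nosep (ys : List Char) (h : '.' ∉ ys) :
    ∀ X p, pvSg (ys ++ X) p = pvSg X (p ++ ys) := by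
  induction ys with
  | nil => simp
  | cons c t ih =>
    intro X p
    have hc : c ≠ '.' := by intro hc; exact h (by simp [hc])
    have ht : '.' ∉ t := by intro hm; exact h (by simp [hm])
    simp only [List.cons_append, pvSg, if_neg hc]
    rw [ih ht X (p ++ [c])]
    simp

theorem pvCountDots_le (cs : List Char) : pvCountDots cs ≤ cs.length := by
  induction cs with
  | nil => simp [pvCountDots]
  | cons c t ih =>
    by_cases hc : c = '.'
    · simp [pvCountDots, hc]; omega
    · simp [pvCountDots, hc]

theorem pvCountDots_decomp (cs : List Char) :
    List.replicate (pvCountDots cs) '.' ++ cs.drop (pvCountDots cs) = cs := by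
  induction cs with
  | nil => simp [pvCountDots]
  | cons c t ih =>
    by_cases hc : c = '.'
    · simp [pvCountDots, hc, List.replicate_succ, ih]
    · simp [pvCountDots, hc]

theorem pvCountDots_drop_head (cs : List Char) :
    ∀ t, cs.drop (pvCountDots cs) ≠ '.' :: t := by
  induction cs with
  | nil => intro t h; simp [pvCountDots] at h
  | cons c r ih =>
    intro t
    by_cases hc : c = '.'
    · simp only [pvCountDots, if_pos hc, List.drop_succ_cons]; exact ih t
    · simp only [pvCountDots, if_neg hc, List.drop_zero]; intro h
      injection h with h1 _
      exact hc h1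

theorem pvDropWhile_eq_drop_countDots (cs : List Char) :
    cs.dropWhile (· == '.') = cs.drop (pvCountDots cs) := by
  induction cs with
  | nil => simp [pvCountDots]
  | cons c t ih =>
    by_cases hc : c = '.'
    · simp [pvCountDots, hc, ih]
    · simp [pvCountDots, hc]

theorem pvRp_run : ∀ n d X, d ≤ n → (∀ t, X ≠ '.' :: t) →
    pvRp '.' ['\x07', '\x07'] (List.replicate d '.' ++ X) =
      List.replicate (2 * (d / 2)) '\x07' ++
        (if d % 2 = 1 then '.' :: pvRp '.' ['\x07', '\x07'] X else pvRp '.' ['\x07', '\x07'] X) := by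
  intro n
  induction n with
  | zero =>
    intro d X hd hX
    have : d = 0 := by omega
    subst this; simp
  | succ m ih =>
    intro d X hd hX
    match d with
    | 0 => simp
    | 1 =>
      have h1 : List.replicate 1 '.' ++ X = '.' :: X := by simp
      have hdiv : 2 * (1 / 2) = 0 := by norm_num
      rw [h1, hdiv, if_pos (show 1 % 2 = 1 by norm_num)]
      simp only [List.replicate_zero, List.nil_append]
      cases X with
      | nil => simp [pvRp]
      | cons x xs =>
        have hx : ¬ x = '.' := fun he => hX xs (by rw [he])
        simp [pvRp, hx]
    | k + 2 =>
      have h2 : List.replicate (k + 2) '.' ++ X = '.' :: '.' :: (List.replicate k '.' ++ X) := by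
        simp [List.replicate_succ]
      rw [h2]
      show (if '.' = '.' ∧ '.' = '.' then
              ['\x07', '\x07'] ++ pvRp '.' ['\x07', '\x07'] (List.replicate k '.' ++ X)
            else _) = _
      rw [if_pos ⟨rfl, rfl⟩, ih k X (by omega) hX]
      have hdiv : 2 * ((k + 2) / 2) = 2 * (k / 2) + 1 + 1 := by omega
      have hmod : (k + 2) % 2 = k % 2 := by omega
      rw [hdiv, hmod, List.replicate_succ, List.replicate_succ]
      simp

theorem pvScan_nil_eq (buf : List Char) (out : List String)
    (h7 : '\x07' ∉ buf) (h8 : '\x08' ∉ buf) :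
    pvScan [] buf out =
      out ++ ((pvSg (pvRp '.' ['\x07', '\x07'] []) (pvEnc buf)).filter (fun k => !k.isEmpty)).map pvPost := by
  rw [pvScan]
  by_cases hb : buf = []
  · subst hb; simp [pvRp, pvSg, pvEnc]
  · have he : pvEnc buf ≠ [] := fun h => hb ((pvEnc_nil_iff buf).mp h)
    rw [if_neg (by simpa [List.isEmpty_iff] using hb)]
    show _ = _ ++ List.map pvPost (List.filter _ [pvEnc buf])
    rw [List.filter_cons, if_pos (by simpa [List.isEmpty_iff] using he)]
    simp [pvPost_enc buf h7 h8]

-- Main invariant: B's scanner equals A's pipeline, tracked through buffer and output.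
theorem pvMain : ∀ n cs buf out, cs.length ≤ n → pvNoBell cs → '\x07' ∉ buf → '\x08' ∉ buf →
    pvScan cs buf out =
      out ++ ((pvSg (pvRp '.' ['\x07', '\x07'] cs) (pvEnc buf)).filter (fun k => !k.isEmpty)).map pvPost := by
  intro n
  induction n with
  | zero =>
    intro cs buf out h hnb h7 h8
    have : cs = [] := by cases cs <;> simp_all
    subst this
    exact pvScan_nil_eq buf out h7 h8
  | succ m ih =>
    intro cs buf out h hnb h7 h8
    match cs with
    | [] => exact pvScan_nil_eq buf out h7 h8
    | c :: rest =>
      by_cases hc : c = '.'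
      · subst hc
        -- run of dots
        set d := pvCountDots rest + 1 with hd
        have hdcs : pvCountDots ('.' :: rest) = d := by simp [pvCountDots, hd]
        set X := rest.drop (d - 1) with hXdef
        have hXcs : ('.' :: rest).drop d = X := by
          simp [hd, hXdef]
        have hdecomp : List.replicate d '.' ++ X = '.' :: rest := by
          rw [← hXcs, ← hdcs]; exact pvCountDots_decomp ('.' :: rest)
        have hXhead : ∀ t, X ≠ '.' :: t := by
          rw [← hXcs, ← hdcs]; exact pvCountDots_drop_head ('.' :: rest)
        have hXlen : X.length ≤ m := by
          have h1 : X.length ≤ rest.length := by rw [hXdef]; simp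
          simp at h; omega
        have hXnb : pvNoBell X := by
          intro x hx
          exact hnb x (by rw [← hXcs] at hx; exact List.mem_of_mem_drop hx)
        set buf' := buf ++ List.replicate (d / 2) '.' with hbuf'
        have h7' : '\x07' ∉ buf' := by
          rw [hbuf']; intro hm
          rcases List.mem_append.mp hm with hm | hm
          · exact h7 hm
          · exact absurd (List.eq_of_mem_replicate hm) (by decide)
        have h8' : '\x08' ∉ buf' := by
          rw [hbuf']; intro hm
          rcases List.mem_append.mp hm with hm | hm
          · exact h8 hm
          · exact absurd (List.eq_of_mem_replicate hm) (by decide)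
        have hencbuf' : pvEnc buf ++ List.replicate (2 * (d / 2)) '\x07' = pvEnc buf' := by
          rw [hbuf', pvEnc_append, pvEnc_replicate_dot]
        have hnosep : ('.' : Char) ∉ List.replicate (2 * (d / 2)) '\x07' := by
          intro hm; have := List.eq_of_mem_replicate hm; simp at this
        -- rewrite the A-side
        have hrp : pvRp '.' ['\x07', '\x07'] ('.' :: rest) =
            List.replicate (2 * (d / 2)) '\x07' ++
              (if d % 2 = 1 then '.' :: pvRp '.' ['\x07', '\x07'] X else pvRp '.' ['\x07', '\x07'] X) := by
          rw [← hdecomp]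
          exact pvRp_run d d X (le_refl _) hXhead
        rw [hrp, pvSg_append_nosep _ hnosep, hencbuf']
        by_cases hodd : d % 2 = 1
        · rw [if_pos hodd]
          have hlhs : pvScan ('.' :: rest) buf out =
              pvScan X [] (if buf'.isEmpty then out else out ++ [String.ofList buf']) := by
            rw [pvScan]
            simp only [← hd, ← hbuf', if_pos hodd, ← hXdef]
            simp
          rw [hlhs, ih X [] _ hXlen hXnb (by simp) (by simp)]
          show _ = out ++ List.map pvPost (List.filter _ (pvSg ('.' :: pvRp '.' ['\x07','\x07'] X) (pvEnc buf')))
          rw [show pvSg ('.' :: pvRp '.' ['\x07','\x07'] X) (pvEnc buf') =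
                pvEnc buf' :: pvSg (pvRp '.' ['\x07','\x07'] X) [] from by simp [pvSg]]
          by_cases hb : buf' = []
          · have : pvEnc buf' = [] := by rw [hb]; rfl
            rw [this]
            simp [pvEnc, List.isEmpty_nil, hb]
          · have he : pvEnc buf' ≠ [] := fun hh => hb ((pvEnc_nil_iff buf').mp hh)
            rw [List.filter_cons,
              if_pos (show (!(pvEnc buf').isEmpty) = true by simpa [List.isEmpty_iff] using he),
              if_neg (show ¬(buf'.isEmpty = true) by simpa [List.isEmpty_iff] using hb)]
            rw [List.map_cons, pvPost_enc buf' h7' h8']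
            simp [pvEnc]
        · rw [if_neg hodd]
          have hlhs : pvScan ('.' :: rest) buf out = pvScan X buf' out := by
            rw [pvScan]
            simp only [← hd, ← hbuf', if_neg hodd, ← hXdef]
            simp
          rw [hlhs, ih X buf' out hXlen hXnb h7' h8']
      · -- ordinary character
        have hnbc := hnb c (by simp)
        have hc8 : c ≠ '\x08' := hnbc.2
        have hlhs : pvScan (c :: rest) buf out = pvScan rest (buf ++ [c]) out := by
          rw [pvScan]
          simp [hc, hc8]
        have henc : pvEnc (buf ++ [c]) = pvEnc buf ++ [c] := by
          rw [pvEnc_append]; simp [pvEnc, hc]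
        have hrestnb : pvNoBell rest := fun x hx => hnb x (by simp [hx])
        have h7c : '\x07' ∉ buf ++ [c] := by
          intro hm
          rcases List.mem_append.mp hm with hm | hm
          · exact h7 hm
          · simp at hm; exact hnbc.1 hm.symm
        have h8c : '\x08' ∉ buf ++ [c] := by
          intro hm
          rcases List.mem_append.mp hm with hm | hm
          · exact h8 hm
          · simp at hm; exact hc8 hm.symm
        rw [hlhs, ih rest (buf ++ [c]) out (by simp at h; omega) hrestnb h7c h8c,
            pvRp_cons_of_ne _ _ _ _ hc]
        show _ = out ++ List.map pvPost (List.filter _ (pvSg (c :: pvRp '.' ['\x07','\x07'] rest) (pvEnc buf)))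
        rw [show pvSg (c :: pvRp '.' ['\x07','\x07'] rest) (pvEnc buf) =
              pvSg (pvRp '.' ['\x07','\x07'] rest) (pvEnc buf ++ [c]) from by simp [pvSg, hc]]
        rw [henc]

theorem pvNoBell_of_dom (field : String) (h : Dom_split_using_double_replace field) :
    pvNoBell field.toList := by
  intro c hc
  have hall : ∀ c ∈ field.toList, pvDomChar c = true := by
    have := h; unfold Dom_split_using_double_replace pvDomStr at this
    exact fun c hc => List.all_eq_true.mp this c hc
  have hx := hall c hc
  constructor
  · intro he; rw [he] at hx; exact absurd hx (by decide)
  · intro he; rw [he] at hx; exact absurd hx (by decide)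

-- ===== VERDICT (by name: the statement is the Claim_ definition above) =====
theorem split_using_double_replace_spec : Claim_equal_split_using_double_replace := by
  intro field hdom
  unfold Spec_split_using_double_replace
  have hnb : pvNoBell field.toList := pvNoBell_of_dom field hdom
  unfold split_using_double_replace split_using_double_replace_alt
  set cs := field.toList with hcs
  by_cases hsw : PySem.Chars.startswith cs ['.', '.'] = true
  · rw [if_pos hsw, if_pos hsw]
    simp only []
    -- leading-dot branch
    have hpre : List.IsPrefix ['.', '.'] cs := (PySem.Chars.startswith_iff cs ['.', '.']).mp hsw
    obtain ⟨t, ht⟩ := hpre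
    have hlead2 : 2 ≤ pvCountDots cs := by
      rw [← ht]; simp [pvCountDots]
    set lead := pvCountDots cs with hlead
    have hleadle : lead ≤ cs.length := pvCountDots_le cs
    have hdw : cs.dropWhile (· == '.') = cs.drop lead := pvDropWhile_eq_drop_countDots cs
    have hdroplen : (cs.drop lead).length = cs.length - lead := by simp
    have hback : (cs.length : Int) - ((cs.dropWhile (· == '.')).length : Int) - 1 = ((lead - 1 : Nat) : Int) := by
      rw [hdw, hdroplen]; omega
    rw [hback, PySem.List.pyRepeat_singleton]
    have htoNat : ((lead - 1 : Nat) : Int).toNat = lead - 1 := by omega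
    rw [htoNat]
    have hnbX : pvNoBell (cs.drop lead) := fun x hx => hnb x (List.mem_of_mem_drop hx)
    rw [pvMain (cs.drop lead).length (cs.drop lead) [] _ (le_refl _) hnbX (by simp) (by simp)]
    rw [hdw, pvReplace_pair, pvSplitOn_dot]
    rfl
  · rw [if_neg hsw, if_neg hsw]
    rw [pvMain cs.length cs [] [] (le_refl _) hnb (by simp) (by simp)]
    rw [pvReplace_pair, pvSplitOn_dot]
    rfl
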